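-- pv_equiv track=rewrite | github.com/coco-in-bluemoon/baekjoon-online-judge | CLASS 3/9205: 맥주 마시며 걸어가기/solution.py | solution
-- ===== SOURCE A (Python) =====
-- from collections import deque
--
-- def calculate_distance(source, destination):
--     return abs(source[0] - destination[0]) + abs(source[1] - destination[1])
--
-- def solution(home, drug_stores, festival):
--     MAX_DISTANCE = 1000
--     queue = deque([home])
--
--     visited = [False] * len(drug_stores)
--
--     while queue:
--         x, y = queue.popleft()
--
--         if calculate_distance((x, y), festival) <= MAX_DISTANCE:
--             return 'happy'
--
--         for index, drug_store in enumerate(drug_stores):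
--             if visited[index] or calculate_distance((x, y), drug_store) > MAX_DISTANCE:
--                 continue
--             visited[index] = True
--             queue.append(drug_store)
--
--     return 'sad'
-- ===== SOURCE B (Python) =====
-- def solution(home, drug_stores, festival):
--     points = [home] + drug_stores + [festival]
--     n = len(points)
--     parent = list(range(n))
--     rank = [0] * n
--
--     def find(i):
--         while parent[i] != i:
--             i = parent[i]
--         return i
--
--     def union(i, j):
--         ri, rj = find(i), find(j)
--         if ri == rj:
--             return
--         if rank[ri] < rank[rj]:
--             parent[ri] = rj
--         elif rank[rj] < rank[ri]:
--             parent[rj] = ri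
--         else:
--             parent[ri] = rj
--             rank[rj] += 1
--
--     for i in range(n):
--         for j in range(i + 1, n):
--             dx = points[i][0] - points[j][0]
--             dy = points[i][1] - points[j][1]
--             if abs(dx) + abs(dy) <= 1000:
--                 union(i, j)
--
--     return 'happy' if find(0) == find(n - 1) else 'sad'
-- ===== Notes on version B (the rewrite author's own statement) =====
-- stated objective: alternative
-- what changed: Replaced the BFS with a deque and visited list by a union-find (parent/rank arrays) over home, all stores and festival, unioning every pair at Manhattan distance <= 1000 and comparing the roots of home and festival.
import Mathlib
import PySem

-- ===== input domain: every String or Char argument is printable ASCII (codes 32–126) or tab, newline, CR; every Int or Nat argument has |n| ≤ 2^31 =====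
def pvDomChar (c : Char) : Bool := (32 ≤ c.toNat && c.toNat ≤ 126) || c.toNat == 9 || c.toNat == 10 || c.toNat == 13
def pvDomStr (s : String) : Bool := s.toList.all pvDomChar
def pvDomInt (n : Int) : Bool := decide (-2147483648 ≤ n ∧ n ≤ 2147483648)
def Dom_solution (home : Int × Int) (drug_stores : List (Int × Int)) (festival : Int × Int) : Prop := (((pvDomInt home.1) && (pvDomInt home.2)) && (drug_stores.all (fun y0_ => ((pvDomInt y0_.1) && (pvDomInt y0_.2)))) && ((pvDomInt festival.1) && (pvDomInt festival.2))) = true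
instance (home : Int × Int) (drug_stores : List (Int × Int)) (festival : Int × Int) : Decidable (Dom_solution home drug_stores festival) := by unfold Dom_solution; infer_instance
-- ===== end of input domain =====

-- B replaces A's BFS (deque + visited list) by a union-find (parent/rank) over home, the stores
-- and festival, unioning every pair at Manhattan distance ≤ 1000; no speed claim ("alternative").

-- ===== PORT A =====

-- abs(source[0]-destination[0]) + abs(source[1]-destination[1])
def calculate_distance (source destination : Int × Int) : Int :=
  |source.1 - destination.1| + |source.2 - destination.2|

-- while queue: pop; check festival; enumerate stores, mark & append
-- (enumerate(drug_stores) ported as drug_stores.zipIdx: same (store, index) pairs).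
-- The fuel argument only makes the recursion structural; solution supplies
-- drug_stores.length + 1, which by the measure lemma above is never exhausted.
def bfsLoop (festival : Int × Int) (drug_stores : List (Int × Int)) :
    Nat → List (Int × Int) → List Bool → String
  | _, [], _ => "sad"
  | 0, _ :: _, _ => "sad"
  | fuel + 1, xy :: rest, visited =>
    if calculate_distance xy festival ≤ 1000 then "happy"
    else
      let r := (drug_stores.zipIdx).foldl (fun vq is =>
        if vq.1.getD is.2 false = true ∨ 1000 < calculate_distance xy is.1 then vq
        else (vq.1.set is.2 true, vq.2 ++ [is.1])) (visited, rest)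
      bfsLoop festival drug_stores fuel r.2 r.1

def solution (home : Int × Int) (drug_stores : List (Int × Int)) (festival : Int × Int) : String :=
  bfsLoop festival drug_stores (drug_stores.length + 1) [home]
    (List.replicate drug_stores.length false)

-- ===== PORT B =====

-- find: follow parent links to the root; fuel n (the node count) makes it structural,
-- it provably suffices because ranks strictly increase towards the root.
def ufFind (parent : List Nat) : Nat → Nat → Nat
  | 0, i => i
  | fuel + 1, i =>
    let p := parent.getD i i
    if p = i then i else ufFind parent fuel p

def ufUnion (n : Nat) (st : List Nat × List Nat) (i j : Nat) : List Nat × List Nat :=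
  let ri := ufFind st.1 n i
  let rj := ufFind st.1 n j
  if ri = rj then st
  else if st.2.getD ri 0 < st.2.getD rj 0 then (st.1.set ri rj, st.2)
  else if st.2.getD rj 0 < st.2.getD ri 0 then (st.1.set rj ri, st.2)
  else (st.1.set ri rj, st.2.set rj (st.2.getD rj 0 + 1))

def solution_alt (home : Int × Int) (drug_stores : List (Int × Int)) (festival : Int × Int) : String :=
  let pts := home :: (drug_stores ++ [festival])
  let n := pts.length
  let final := (List.range n).foldl (fun st i =>
    (List.range' (i + 1) (n - (i + 1))).foldl (fun st j =>
      if |(pts.getD i (0, 0)).1 - (pts.getD j (0, 0)).1| +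
          |(pts.getD i (0, 0)).2 - (pts.getD j (0, 0)).2| ≤ 1000 then ufUnion n st i j
      else st) st) (List.range n, List.replicate n 0)
  if ufFind final.1 n 0 = ufFind final.1 n (n - 1) then "happy" else "sad"

-- ===== PRECONDITION & SPEC =====
def Spec_solution (home : Int × Int) (drug_stores : List (Int × Int)) (festival : Int × Int) (out : String) : Prop := out = solution_alt home drug_stores festival
instance (home : Int × Int) (drug_stores : List (Int × Int)) (festival : Int × Int) (out : String) : Decidable (Spec_solution home drug_stores festival out) := by unfold Spec_solution; infer_instance

-- ===== CLAIM (what is proved, stated in full; the proofs are below) =====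
def Claim_equal_solution : Prop := ∀ (home : Int × Int) (drug_stores : List (Int × Int)) (festival : Int × Int), Dom_solution home drug_stores festival → Spec_solution home drug_stores festival (solution home drug_stores festival)

-- ===== LEMMAS AND PROOFS =====

/- ---------- shared graph abstraction ---------- -/

def pvPts (home : Int × Int) (drug_stores : List (Int × Int)) (festival : Int × Int) : List (Int × Int) :=
  home :: (drug_stores ++ [festival])

theorem pvPts_length (home : Int × Int) (ss : List (Int × Int)) (f : Int × Int) :
    (pvPts home ss f).length = ss.length + 2 := by
  simp [pvPts]

theorem pvPts_def (home : Int × Int) (ss : List (Int × Int)) (f : Int × Int) :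
    pvPts home ss f = home :: (ss ++ [f]) := rfl

def pvR (pts : List (Int × Int)) (i j : Nat) : Prop :=
  i < pts.length ∧ j < pts.length ∧
    calculate_distance (pts.getD i (0, 0)) (pts.getD j (0, 0)) ≤ 1000

def pvConn (pts : List (Int × Int)) : Nat → Nat → Prop := Relation.ReflTransGen (pvR pts)

inductive pvReach (home : Int × Int) (stores : List (Int × Int)) : (Int × Int) → Prop
  | base : pvReach home stores home
  | step {p s : Int × Int} : pvReach home stores p → s ∈ stores →
      calculate_distance p s ≤ 1000 → pvReach home stores s

def pvHappy (home : Int × Int) (stores : List (Int × Int)) (festival : Int × Int) : Prop :=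
  ∃ p, pvReach home stores p ∧ calculate_distance p festival ≤ 1000

theorem calc_dist_symm (p q : Int × Int) : calculate_distance p q = calculate_distance q p := by
  unfold calculate_distance; rw [abs_sub_comm, abs_sub_comm p.2]

theorem pvR_symm (pts : List (Int × Int)) {i j : Nat} (h : pvR pts i j) : pvR pts j i := by
  obtain ⟨h1, h2, h3⟩ := h; exact ⟨h2, h1, by rwa [calc_dist_symm]⟩

theorem pvConn_symm (pts : List (Int × Int)) {i j : Nat} (h : pvConn pts i j) : pvConn pts j i := by
  induction h with
  | refl => exact Relation.ReflTransGen.refl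
  | tail _ hR ih => exact Relation.ReflTransGen.head (pvR_symm pts hR) ih

/- ---------- A side: BFS characterization ---------- -/

def bfsStep (x : Int × Int) (vq : List Bool × List (Int × Int)) (is : (Int × Int) × Nat) :
    List Bool × List (Int × Int) :=
  if vq.1.getD is.2 false = true ∨ 1000 < calculate_distance x is.1 then vq
  else (vq.1.set is.2 true, vq.2 ++ [is.1])

theorem bfsLoop_eq_step (festival : Int × Int) (drug_stores : List (Int × Int))
    (fuel : Nat) (xy : Int × Int) (rest : List (Int × Int)) (visited : List Bool) :
    bfsLoop festival drug_stores (fuel + 1) (xy :: rest) visited =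
      if calculate_distance xy festival ≤ 1000 then "happy"
      else
        bfsLoop festival drug_stores fuel
          ((drug_stores.zipIdx.foldl (bfsStep xy) (visited, rest)).2)
          ((drug_stores.zipIdx.foldl (bfsStep xy) (visited, rest)).1) := rfl

-- count/measure facts about the inner fold
theorem count_false_set_true : ∀ (v : List Bool) (i : Nat), i < v.length → v.getD i false = false →
    (v.set i true).count false + 1 = v.count false := by
  intro v
  induction v with
  | nil => intro i h; simp at h
  | cons hd tl ih =>
    intro i h hv
    cases i with
    | zero => simp_all
    | succ k =>
      simp only [List.set_cons_succ, List.count_cons]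
      have := ih k (by simpa using h) (by simpa using hv)
      omega

theorem bfsFold_measure (x : Int × Int) (l : List ((Int × Int) × Nat)) :
    ∀ (v : List Bool) (q : List (Int × Int)),
    (∀ p ∈ l, p.2 < v.length) →
    (l.foldl (bfsStep x) (v, q)).2.length +
      ((l.foldl (bfsStep x) (v, q)).1.count false)
      ≤ q.length + v.count false := by
  induction l with
  | nil => intro v q _; simp
  | cons hd tl ih =>
    intro v q hlt
    simp only [List.foldl_cons]
    by_cases hc : v.getD hd.2 false = true ∨ 1000 < calculate_distance x hd.1
    · rw [show bfsStep x (v, q) hd = (v, q) from by unfold bfsStep; rw [if_pos hc]]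
      exact ih v q (fun p hp => hlt p (List.mem_cons_of_mem _ hp))
    · rw [show bfsStep x (v, q) hd = (v.set hd.2 true, q ++ [hd.1]) from by
        unfold bfsStep; rw [if_neg hc]]
      have hlen : hd.2 < v.length := hlt hd (List.mem_cons_self ..)
      have hfalse : v.getD hd.2 false = false := by
        cases h : v.getD hd.2 false with
        | true => exact absurd (Or.inl h) hc
        | false => rfl
      have hcount := count_false_set_true v hd.2 hlen hfalse
      have := ih (v.set hd.2 true) (q ++ [hd.1]) (fun p hp => by
        have := hlt p (List.mem_cons_of_mem _ hp); simpa using this)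
      simp only [List.length_append, List.length_cons, List.length_nil] at this ⊢
      omega

def bfsTake (x : Int × Int) (v : List Bool) (is : (Int × Int) × Nat) : Bool :=
  !(v.getD is.2 false || decide (1000 < calculate_distance x is.1))

theorem pvGetD_set_self {α : Type} (l : List α) (i : Nat) (x d : α) (h : i < l.length) :
    (l.set i x).getD i d = x := by
  rw [List.getD_eq_getElem _ _ (by simpa using h)]
  simp [List.getElem_set_self]

theorem pvGetD_set_ne {α : Type} (l : List α) (i j : Nat) (x d : α) (h : j ≠ i) :
    (l.set i x).getD j d = l.getD j d := by
  simp [List.getD_eq_getElem?_getD, List.getElem?_set_ne (fun hh => h hh.symm)]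

theorem bfsFold_char (x : Int × Int) (l : List ((Int × Int) × Nat)) :
    ∀ (v : List Bool) (q : List (Int × Int)),
    (l.map Prod.snd).Nodup →
    l.foldl (bfsStep x) (v, q) =
      ((l.filter (bfsTake x v)).foldl (fun w is => w.set is.2 true) v,
       q ++ (l.filter (bfsTake x v)).map Prod.fst) := by
  induction l with
  | nil => intro v q _; simp
  | cons hd tl ih =>
    intro v q hnd
    simp only [List.map_cons, List.nodup_cons] at hnd
    obtain ⟨hnotin, hndtl⟩ := hnd
    simp only [List.foldl_cons]
    by_cases hc : v.getD hd.2 false = true ∨ 1000 < calculate_distance x hd.1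
    · have hstep : bfsStep x (v, q) hd = (v, q) := by unfold bfsStep; rw [if_pos hc]
      have htake : bfsTake x v hd = false := by
        unfold bfsTake
        rcases hc with hc | hc
        · rw [hc]; rfl
        · rw [decide_eq_true hc, Bool.or_true]; rfl
      rw [hstep, List.filter_cons_of_neg (by simp [htake])]
      exact ih v q hndtl
    · have hc1 : v.getD hd.2 false = false := by
        cases h : v.getD hd.2 false with
        | true => exact absurd (Or.inl h) hc
        | false => rfl
      have hc2 : ¬ 1000 < calculate_distance x hd.1 := fun hh => hc (Or.inr hh)
      have hstep : bfsStep x (v, q) hd = (v.set hd.2 true, q ++ [hd.1]) := by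
        unfold bfsStep; rw [if_neg hc]
      have htake : bfsTake x v hd = true := by
        unfold bfsTake
        rw [hc1, decide_eq_false hc2, Bool.or_false]; rfl
      have hfil : tl.filter (bfsTake x (v.set hd.2 true)) = tl.filter (bfsTake x v) := by
        apply List.filter_congr
        intro a ha
        have hne : a.2 ≠ hd.2 := fun hh => hnotin (hh ▸ List.mem_map_of_mem ha)
        unfold bfsTake
        rw [pvGetD_set_ne v hd.2 a.2 true false hne]
      rw [hstep, ih _ _ hndtl, hfil, List.filter_cons_of_pos htake, List.foldl_cons,
        List.map_cons]
      simp

theorem setFold_length (L : List ((Int × Int) × Nat)) :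
    ∀ v : List Bool, (L.foldl (fun w is => w.set is.2 true) v).length = v.length := by
  induction L with
  | nil => intro v; rfl
  | cons hd tl ih => intro v; simp [List.foldl_cons, ih]

theorem setFold_getD (L : List ((Int × Int) × Nat)) :
    ∀ (v : List Bool) (j : Nat),
    (L.foldl (fun w is => w.set is.2 true) v).getD j false =
      (v.getD j false || (decide (j ∈ L.map Prod.snd) && decide (j < v.length))) := by
  induction L with
  | nil => intro v j; simp
  | cons hd tl ih =>
    intro v j
    simp only [List.foldl_cons]
    rw [ih]
    by_cases hj : j = hd.2
    · subst hj
      by_cases hlt : hd.2 < v.length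
      · have h1 : (v.set hd.2 true).getD hd.2 false = true :=
          pvGetD_set_self v hd.2 true false hlt
        simp only [List.getD_eq_getElem?_getD] at h1
        simp [h1, hlt, List.getD_eq_getElem?_getD]
      · have h1 : (v.set hd.2 true).getD hd.2 false = false := by
          apply List.getD_eq_default
          rw [List.length_set]; omega
        have h2 : v.getD hd.2 false = false := List.getD_eq_default _ _ (by omega)
        simp only [List.getD_eq_getElem?_getD] at h1 h2
        simp [h1, h2, hlt]
    · have h1 : (v.set hd.2 true).getD j false = v.getD j false :=
        pvGetD_set_ne v hd.2 j true false hj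
      simp only [List.getD_eq_getElem?_getD] at h1
      by_cases hmem : j ∈ List.map Prod.snd tl <;> simp [h1, List.mem_cons, hj, hmem]

inductive pvReachQV (stores : List (Int × Int)) (queue : List (Int × Int)) (visited : List Bool) :
    (Int × Int) → Prop
  | base {p : Int × Int} : p ∈ queue → pvReachQV stores queue visited p
  | step {p : Int × Int} (idx : Nat) : pvReachQV stores queue visited p →
      idx < stores.length → visited.getD idx false = false →
      calculate_distance p (stores.getD idx (0, 0)) ≤ 1000 →
      pvReachQV stores queue visited (stores.getD idx (0, 0))

theorem pvReachQV_nil (stores : List (Int × Int)) (visited : List Bool) (p : Int × Int)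
    (h : pvReachQV stores [] visited p) : False := by
  induction h with
  | base hp => simp at hp
  | step _ _ _ _ _ ih => exact ih

theorem bfs_transfer_new_old (stores : List (Int × Int)) (x : Int × Int)
    (rest : List (Int × Int)) (visited : List Bool) (hlen : visited.length = stores.length)
    (p : Int × Int)
    (h : pvReachQV stores ((stores.zipIdx.foldl (bfsStep x) (visited, rest)).2)
          ((stores.zipIdx.foldl (bfsStep x) (visited, rest)).1) p) :
    pvReachQV stores (x :: rest) visited p := by
  have hnodup : (stores.zipIdx.map Prod.snd).Nodup := by
    rw [List.zipIdx_map_snd]; exact List.nodup_range'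
  have hchar := bfsFold_char x stores.zipIdx visited rest hnodup
  have h1 : (stores.zipIdx.foldl (bfsStep x) (visited, rest)).1 =
      (stores.zipIdx.filter (bfsTake x visited)).foldl (fun w is => w.set is.2 true) visited := by
    rw [hchar]
  have h2 : (stores.zipIdx.foldl (bfsStep x) (visited, rest)).2 =
      rest ++ (stores.zipIdx.filter (bfsTake x visited)).map Prod.fst := by
    rw [hchar]
  induction h with
  | base hp =>
    rw [h2] at hp
    rcases List.mem_append.mp hp with hrest | hnew
    · exact pvReachQV.base (List.mem_cons_of_mem x hrest)
    · obtain ⟨pr, hprL, rfl⟩ := List.mem_map.mp hnew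
      have hfil := List.mem_filter.mp hprL
      have hzip := List.mem_zipIdx_iff_getElem?.mp hfil.1
      obtain ⟨hlt2, hget⟩ := List.getElem?_eq_some_iff.mp hzip
      have htake := hfil.2
      unfold bfsTake at htake
      rw [Bool.not_eq_eq_eq_not, Bool.not_true, Bool.or_eq_false_iff] at htake
      have hvis : visited.getD pr.2 false = false := htake.1
      have hdist : calculate_distance x pr.1 ≤ 1000 :=
        not_lt.mp (of_decide_eq_false htake.2)
      have hgd : stores.getD pr.2 (0, 0) = pr.1 := by
        rw [List.getD_eq_getElem _ _ hlt2, hget]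
      have hst := pvReachQV.step (stores := stores) (queue := x :: rest) (visited := visited)
        pr.2 (pvReachQV.base (List.mem_cons_self ..)) hlt2 hvis (by rw [hgd]; exact hdist)
      rwa [hgd] at hst
  | step idx hp' hidx hvisr hdist ih =>
    rw [h1, setFold_getD] at hvisr
    rw [Bool.or_eq_false_iff] at hvisr
    exact pvReachQV.step idx ih hidx hvisr.1 hdist

theorem bfs_transfer_old_new (stores : List (Int × Int)) (x : Int × Int)
    (rest : List (Int × Int)) (visited : List Bool) (hlen : visited.length = stores.length)
    (p : Int × Int) (h : pvReachQV stores (x :: rest) visited p) :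
    pvReachQV stores ((stores.zipIdx.foldl (bfsStep x) (visited, rest)).2)
      ((stores.zipIdx.foldl (bfsStep x) (visited, rest)).1) p ∨ p = x := by
  have hnodup : (stores.zipIdx.map Prod.snd).Nodup := by
    rw [List.zipIdx_map_snd]; exact List.nodup_range'
  have hchar := bfsFold_char x stores.zipIdx visited rest hnodup
  have h1 : (stores.zipIdx.foldl (bfsStep x) (visited, rest)).1 =
      (stores.zipIdx.filter (bfsTake x visited)).foldl (fun w is => w.set is.2 true) visited := by
    rw [hchar]
  have h2 : (stores.zipIdx.foldl (bfsStep x) (visited, rest)).2 =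
      rest ++ (stores.zipIdx.filter (bfsTake x visited)).map Prod.fst := by
    rw [hchar]
  induction h with
  | base hp =>
    rcases List.mem_cons.mp hp with rfl | hrest
    · exact Or.inr rfl
    · refine Or.inl (pvReachQV.base ?_)
      rw [h2]
      exact List.mem_append.mpr (Or.inl hrest)
  | step idx hp' hidx hvis hdist ih =>
    by_cases hdx : calculate_distance x (stores.getD idx (0, 0)) ≤ 1000
    · refine Or.inl (pvReachQV.base ?_)
      rw [h2]
      refine List.mem_append.mpr (Or.inr ?_)
      refine List.mem_map.mpr ⟨(stores.getD idx (0, 0), idx), ?_, rfl⟩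
      refine List.mem_filter.mpr ⟨?_, ?_⟩
      · apply List.mem_zipIdx_iff_getElem?.mpr
        rw [List.getElem?_eq_getElem hidx, List.getD_eq_getElem _ _ hidx]
      · unfold bfsTake
        rw [hvis, decide_eq_false (not_lt.mpr hdx)]
        rfl
    · rcases ih with hnew | rfl
      · refine Or.inl (pvReachQV.step idx hnew hidx ?_ hdist)
        rw [h1, setFold_getD]
        simp only [List.getD_eq_getElem?_getD] at hvis
        have hnm : idx ∉ (stores.zipIdx.filter (bfsTake x visited)).map Prod.snd := by
          intro hmem
          obtain ⟨pr, hprL, hsnd⟩ := List.mem_map.mp hmem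
          have hfil := List.mem_filter.mp hprL
          have hzip := List.mem_zipIdx_iff_getElem?.mp hfil.1
          rw [hsnd] at hzip
          obtain ⟨hlt2, hget⟩ := List.getElem?_eq_some_iff.mp hzip
          have htake := hfil.2
          unfold bfsTake at htake
          rw [Bool.not_eq_eq_eq_not, Bool.not_true, Bool.or_eq_false_iff] at htake
          have hdd : calculate_distance x pr.1 ≤ 1000 :=
            not_lt.mp (of_decide_eq_false htake.2)
          apply hdx
          rw [List.getD_eq_getElem _ _ hidx, hget]
          exact hdd
        simp [hvis, hnm]
      · exact absurd hdist hdx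

theorem bfsLoop_char (festival : Int × Int) (stores : List (Int × Int)) :
    ∀ (fuel : Nat) (queue : List (Int × Int)) (visited : List Bool),
    visited.length = stores.length →
    queue.length + visited.count false ≤ fuel →
    (bfsLoop festival stores fuel queue visited = "happy" ↔
      ∃ p, pvReachQV stores queue visited p ∧ calculate_distance p festival ≤ 1000) := by
  intro fuel
  induction fuel with
  | zero =>
    intro queue visited hlen hm
    cases queue with
    | nil =>
      rw [show bfsLoop festival stores 0 [] visited = "sad" from rfl]
      constructor
      · intro h; exact absurd h (by decide)
      · rintro ⟨p, hp, -⟩; exact (pvReachQV_nil stores visited p hp).elim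
    | cons a rest =>
      rw [List.length_cons] at hm; omega
  | succ f ih =>
    intro queue visited hlen hm
    cases queue with
    | nil =>
      rw [show bfsLoop festival stores (f + 1) [] visited = "sad" from rfl]
      constructor
      · intro h; exact absurd h (by decide)
      · rintro ⟨p, hp, -⟩; exact (pvReachQV_nil stores visited p hp).elim
    | cons xy rest =>
      rw [bfsLoop_eq_step]
      by_cases hclose : calculate_distance xy festival ≤ 1000
      · rw [if_pos hclose]
        constructor
        · intro _; exact ⟨xy, pvReachQV.base (List.mem_cons_self ..), hclose⟩
        · intro _; rfl
      · rw [if_neg hclose]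
        have hrange : ∀ pr ∈ stores.zipIdx, pr.2 < visited.length := by
          intro pr hpr
          have hzip := List.mem_zipIdx_iff_getElem?.mp hpr
          obtain ⟨hlt2, -⟩ := List.getElem?_eq_some_iff.mp hzip
          omega
        have hnodup : (stores.zipIdx.map Prod.snd).Nodup := by
          rw [List.zipIdx_map_snd]; exact List.nodup_range'
        have hchar := bfsFold_char xy stores.zipIdx visited rest hnodup
        have hlen' : (stores.zipIdx.foldl (bfsStep xy) (visited, rest)).1.length =
            stores.length := by
          rw [hchar, setFold_length]; exact hlen
        have hmeas := bfsFold_measure xy stores.zipIdx visited rest hrange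
        rw [List.length_cons] at hm
        have hm' : (stores.zipIdx.foldl (bfsStep xy) (visited, rest)).2.length +
            (stores.zipIdx.foldl (bfsStep xy) (visited, rest)).1.count false ≤ f := by
          omega
        rw [ih _ _ hlen' hm']
        constructor
        · rintro ⟨p, hp, hd⟩
          exact ⟨p, bfs_transfer_new_old stores xy rest visited hlen p hp, hd⟩
        · rintro ⟨p, hp, hd⟩
          rcases bfs_transfer_old_new stores xy rest visited hlen p hp with hnew | rfl
          · exact ⟨p, hnew, hd⟩
          · exact absurd hd hclose

theorem bfsLoop_sad (festival : Int × Int) (stores : List (Int × Int)) :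
    ∀ (fuel : Nat) (queue : List (Int × Int)) (visited : List Bool),
    bfsLoop festival stores fuel queue visited = "happy" ∨
      bfsLoop festival stores fuel queue visited = "sad" := by
  intro fuel
  induction fuel with
  | zero => intro queue visited; cases queue <;> simp [bfsLoop]
  | succ n ih =>
    intro queue visited
    cases queue with
    | nil => simp [bfsLoop]
    | cons xy rest =>
      rw [bfsLoop]
      split
      · left; rfl
      · exact ih _ _

theorem pvReachQV_init (home : Int × Int) (stores : List (Int × Int)) (p : Int × Int) :
    pvReachQV stores [home] (List.replicate stores.length false) p ↔ pvReach home stores p := by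
  constructor
  · intro h
    induction h with
    | base hp =>
      rcases List.mem_singleton.mp hp with rfl
      exact pvReach.base
    | step idx hp' hidx hvis hdist ih =>
      refine pvReach.step ih ?_ hdist
      rw [List.getD_eq_getElem _ _ hidx]
      exact List.getElem_mem hidx
  · intro h
    induction h with
    | base => exact pvReachQV.base (List.mem_singleton.mpr rfl)
    | @step p' s hp' hs hdist ih =>
      obtain ⟨idx, hidx, rfl⟩ := List.mem_iff_getElem.mp hs
      have hst := pvReachQV.step (stores := stores) (queue := [home])
        (visited := List.replicate stores.length false) idx ih hidx (by simp) ?_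
      · rwa [List.getD_eq_getElem _ _ hidx] at hst
      · rw [List.getD_eq_getElem _ _ hidx]
        exact hdist

theorem solution_char (home : Int × Int) (drug_stores : List (Int × Int)) (festival : Int × Int) :
    (solution home drug_stores festival = "happy" ↔ pvHappy home drug_stores festival) := by
  unfold solution pvHappy
  rw [bfsLoop_char festival drug_stores (drug_stores.length + 1) [home]
      (List.replicate drug_stores.length false) (by simp) (by simp [Nat.add_comm])]
  constructor
  · rintro ⟨p, hp, hd⟩; exact ⟨p, (pvReachQV_init home drug_stores p).mp hp, hd⟩
  · rintro ⟨p, hp, hd⟩; exact ⟨p, (pvReachQV_init home drug_stores p).mpr hp, hd⟩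

/- ---------- B side: union-find characterization ---------- -/

def rankOK (n : Nat) (P K : List Nat) : Prop :=
  P.length = n ∧ K.length = n ∧ (∀ i, i < n → P.getD i i < n) ∧
    (∀ i, i < n → P.getD i i ≠ i → K.getD i 0 < K.getD (P.getD i i) 0)

def connOK (pts : List (Int × Int)) (P : List Nat) : Prop :=
  ∀ i, i < pts.length → pvConn pts i (P.getD i i)

def ufInv (pts : List (Int × Int)) (st : List Nat × List Nat) : Prop :=
  rankOK pts.length st.1 st.2 ∧ connOK pts st.1

def ufS (n : Nat) (K : List Nat) (i : Nat) : Finset Nat :=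
  (Finset.range n).filter (fun j => K.getD i 0 ≤ K.getD j 0)

theorem ufS_card_le (n : Nat) (K : List Nat) (i : Nat) : (ufS n K i).card ≤ n := by
  calc (ufS n K i).card ≤ (Finset.range n).card := Finset.card_filter_le _ _
    _ = n := Finset.card_range n

theorem ufS_self_mem (n : Nat) (K : List Nat) (i : Nat) (h : i < n) : i ∈ ufS n K i := by
  simp [ufS, Finset.mem_filter, Finset.mem_range, h]

theorem ufFind_fix (Q : List Nat) (r : Nat) (h : Q.getD r r = r) :
    ∀ f, ufFind Q f r = r := by
  intro f; cases f with
  | zero => rfl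
  | succ f => simp only [ufFind]; rw [h]; simp

theorem ufS_pos (n : Nat) (K : List Nat) (i : Nat) (h : i < n) : 0 < (ufS n K i).card :=
  Finset.card_pos.mpr ⟨i, ufS_self_mem n K i h⟩

theorem ufS_lt (n : Nat) (K : List Nat) (i p : Nat) (hi : i < n) (hp : p < n)
    (hK : K.getD i 0 < K.getD p 0) : (ufS n K p).card < (ufS n K i).card := by
  have hsub : ufS n K p ⊆ ufS n K i := by
    intro j hj
    simp only [ufS, Finset.mem_filter, Finset.mem_range] at hj ⊢
    exact ⟨hj.1, le_trans (le_of_lt hK) hj.2⟩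
  have hni : i ∉ ufS n K p := by
    simp only [ufS, Finset.mem_filter, Finset.mem_range]
    rintro ⟨-, hle⟩; omega
  exact Finset.card_lt_card ((Finset.ssubset_iff_of_subset hsub).mpr
    ⟨i, ufS_self_mem n K i hi, hni⟩)

theorem ufFind_succ (P : List Nat) (f i : Nat) :
    ufFind P (f + 1) i = if P.getD i i = i then i else ufFind P f (P.getD i i) := rfl

theorem ufFind_adequate (n : Nat) (P K : List Nat) (h : rankOK n P K) :
    ∀ (fuel i : Nat), i < n → (ufS n K i).card ≤ fuel →
      (∀ fuel', (ufS n K i).card ≤ fuel' → ufFind P fuel i = ufFind P fuel' i) ∧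
      ufFind P fuel i < n ∧ P.getD (ufFind P fuel i) (ufFind P fuel i) = ufFind P fuel i := by
  obtain ⟨hPlen, hKlen, hPlt, hKrank⟩ := h
  intro fuel
  induction fuel with
  | zero => intro i hi hcard; exact absurd hcard (by have := ufS_pos n K i hi; omega)
  | succ f ih =>
    intro i hi hcard
    by_cases hroot : P.getD i i = i
    · refine ⟨?_, ?_, ?_⟩
      · intro fuel' hcard'
        obtain ⟨f', rfl⟩ : ∃ f', fuel' = f' + 1 :=
          ⟨fuel' - 1, by have := ufS_pos n K i hi; omega⟩
        rw [ufFind_succ, ufFind_succ, if_pos hroot, if_pos hroot]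
      · rw [ufFind_succ, if_pos hroot]; exact hi
      · rw [ufFind_succ, if_pos hroot]; exact hroot
    · have hplt : P.getD i i < n := hPlt i hi
      have hrk : K.getD i 0 < K.getD (P.getD i i) 0 := hKrank i hi hroot
      have hcardp : (ufS n K (P.getD i i)).card < (ufS n K i).card := ufS_lt n K i _ hi hplt hrk
      have ihp := ih (P.getD i i) hplt (by omega)
      have hstep : ∀ g, ufFind P (g + 1) i = ufFind P g (P.getD i i) := by
        intro g; rw [ufFind_succ, if_neg hroot]
      refine ⟨?_, ?_, ?_⟩
      · intro fuel' hcard'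
        obtain ⟨f', rfl⟩ : ∃ f', fuel' = f' + 1 :=
          ⟨fuel' - 1, by have := ufS_pos n K i hi; omega⟩
        rw [hstep f, hstep f']
        exact ihp.1 f' (by omega)
      · rw [hstep f]; exact ihp.2.1
      · rw [hstep f]; exact ihp.2.2

theorem ufFind_conn (pts : List (Int × Int)) (P K : List Nat)
    (h : rankOK pts.length P K) (hc : connOK pts P) :
    ∀ (fuel i : Nat), i < pts.length → (ufS pts.length K i).card ≤ fuel →
      pvConn pts i (ufFind P fuel i) := by
  obtain ⟨hPlen, hKlen, hPlt, hKrank⟩ := h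
  intro fuel
  induction fuel with
  | zero => intro i hi hcard; exact absurd hcard (by have := ufS_pos pts.length K i hi; omega)
  | succ f ih =>
    intro i hi hcard
    by_cases hroot : P.getD i i = i
    · rw [ufFind_succ, if_pos hroot]; exact Relation.ReflTransGen.refl
    · have hplt : P.getD i i < pts.length := hPlt i hi
      have hrk := hKrank i hi hroot
      have hcardp := ufS_lt pts.length K i _ hi hplt hrk
      have hstep : ufFind P (f + 1) i = ufFind P f (P.getD i i) := by
        rw [ufFind_succ, if_neg hroot]
      rw [hstep]
      exact Relation.ReflTransGen.trans (hc i hi) (ih (P.getD i i) hplt (by omega))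

theorem ufFind_set (n : Nat) (P K : List Nat) (h : rankOK n P K)
    (a b : Nat) (ha : a < n) (hb : b < n) (hra : P.getD a a = a) (hrb : P.getD b b = b)
    (hab : a ≠ b) :
    ∀ (fuel i : Nat), i < n → (ufS n K i).card ≤ fuel →
      ufFind (P.set a b) fuel i = (if ufFind P fuel i = a then b else ufFind P fuel i) := by
  obtain ⟨hPlen, hKlen, hPlt, hKrank⟩ := h
  intro fuel
  induction fuel with
  | zero => intro i hi hcard; exact absurd hcard (by have := ufS_pos n K i hi; omega)
  | succ f ih =>
    intro i hi hcard
    by_cases hroot : P.getD i i = i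
    · by_cases hia : i = a
      · subst hia
        have h1 : (P.set i b).getD i i = b := pvGetD_set_self P i b i (by omega)
        have hbi : b ≠ i := fun hh => hab hh.symm
        have h2 : ufFind (P.set i b) (f + 1) i = ufFind (P.set i b) f b := by
          rw [ufFind_succ, h1, if_neg hbi]
        have h3 : (P.set i b).getD b b = b := by
          rw [pvGetD_set_ne P i b b b hbi]; exact hrb
        rw [h2, ufFind_fix _ b h3 f, ufFind_succ, if_pos hroot]
        simp
      · have h1 : (P.set a b).getD i i = i := by
          rw [pvGetD_set_ne P a i b i hia]; exact hroot
        have hL : ufFind (P.set a b) (f + 1) i = i := by rw [ufFind_succ, if_pos h1]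
        have hR : ufFind P (f + 1) i = i := by rw [ufFind_succ, if_pos hroot]
        rw [hL, hR, if_neg hia]
    · have hia : i ≠ a := fun hh => hroot (hh ▸ hh ▸ hra)
      have hplt : P.getD i i < n := hPlt i hi
      have hrk := hKrank i hi hroot
      have hcardp := ufS_lt n K i _ hi hplt hrk
      have h1 : (P.set a b).getD i i = P.getD i i := pvGetD_set_ne P a i b i hia
      have h2 : ufFind (P.set a b) (f + 1) i = ufFind (P.set a b) f (P.getD i i) := by
        rw [ufFind_succ, h1, if_neg hroot]
      have h3 : ufFind P (f + 1) i = ufFind P f (P.getD i i) := by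
        rw [ufFind_succ, if_neg hroot]
      rw [h2, h3]
      exact ih (P.getD i i) hplt (by omega)

theorem ufUnion_same (n : Nat) (st : List Nat × List Nat) (i j : Nat)
    (h : ufFind st.1 n i = ufFind st.1 n j) : ufUnion n st i j = st := by
  simp only [ufUnion]; rw [if_pos h]

theorem ufUnion_ltK (n : Nat) (st : List Nat × List Nat) (i j : Nat)
    (h : ¬ ufFind st.1 n i = ufFind st.1 n j)
    (hlt : st.2.getD (ufFind st.1 n i) 0 < st.2.getD (ufFind st.1 n j) 0) :
    ufUnion n st i j = (st.1.set (ufFind st.1 n i) (ufFind st.1 n j), st.2) := by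
  simp only [ufUnion]; rw [if_neg h, if_pos hlt]

theorem ufUnion_gtK (n : Nat) (st : List Nat × List Nat) (i j : Nat)
    (h : ¬ ufFind st.1 n i = ufFind st.1 n j)
    (hnlt : ¬ st.2.getD (ufFind st.1 n i) 0 < st.2.getD (ufFind st.1 n j) 0)
    (hgt : st.2.getD (ufFind st.1 n j) 0 < st.2.getD (ufFind st.1 n i) 0) :
    ufUnion n st i j = (st.1.set (ufFind st.1 n j) (ufFind st.1 n i), st.2) := by
  simp only [ufUnion]; rw [if_neg h, if_neg hnlt, if_pos hgt]

theorem ufUnion_eqK (n : Nat) (st : List Nat × List Nat) (i j : Nat)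
    (h : ¬ ufFind st.1 n i = ufFind st.1 n j)
    (hnlt : ¬ st.2.getD (ufFind st.1 n i) 0 < st.2.getD (ufFind st.1 n j) 0)
    (hngt : ¬ st.2.getD (ufFind st.1 n j) 0 < st.2.getD (ufFind st.1 n i) 0) :
    ufUnion n st i j = (st.1.set (ufFind st.1 n i) (ufFind st.1 n j),
      st.2.set (ufFind st.1 n j) (st.2.getD (ufFind st.1 n j) 0 + 1)) := by
  simp only [ufUnion]; rw [if_neg h, if_neg hnlt, if_neg hngt]

theorem set_rankOK (n : Nat) (P K : List Nat) (h : rankOK n P K) (a b : Nat)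
    (ha : a < n) (hb : b < n) (hra : P.getD a a = a) (hrb : P.getD b b = b) (hab : a ≠ b)
    (hKab : K.getD a 0 ≤ K.getD b 0) :
    rankOK n (P.set a b)
      (if K.getD a 0 = K.getD b 0 then K.set b (K.getD b 0 + 1) else K) := by
  obtain ⟨hPlen, hKlen, hPlt, hKrank⟩ := h
  set K' := if K.getD a 0 = K.getD b 0 then K.set b (K.getD b 0 + 1) else K with hK'
  have hK'len : K'.length = n := by
    rw [hK']; split <;> simp [hKlen]
  have hK'a : ∀ x, x ≠ b → K'.getD x 0 = K.getD x 0 := by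
    intro x hx; rw [hK']; split
    · exact pvGetD_set_ne K b x _ 0 hx
    · rfl
  have hK'b : K.getD b 0 ≤ K'.getD b 0 := by
    rw [hK']; split
    · rw [pvGetD_set_self K b _ 0 (by omega)]; omega
    · exact le_refl _
  refine ⟨by simp [hPlen], hK'len, ?_, ?_⟩
  · intro x hx
    by_cases hxa : x = a
    · subst hxa; rw [pvGetD_set_self P x b x (by omega)]; exact hb
    · rw [pvGetD_set_ne P a x b x hxa]; exact hPlt x hx
  · intro x hx hne
    by_cases hxa : x = a
    · subst hxa
      rw [pvGetD_set_self P x b x (by omega)] at hne ⊢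
      have hxb : x ≠ b := hab
      rw [hK'a x hxb]
      rcases lt_or_eq_of_le hKab with hlt | heq
      · calc K.getD x 0 < K.getD b 0 := hlt
          _ ≤ K'.getD b 0 := hK'b
      · rw [hK']; rw [if_pos heq, pvGetD_set_self K b _ 0 (by omega)]; omega
    · rw [pvGetD_set_ne P a x b x hxa] at hne ⊢
      have hxb : x ≠ b := by
        intro hxb; subst hxb; exact hne hrb
      rw [hK'a x hxb]
      have hold := hKrank x hx hne
      by_cases hpb : P.getD x x = b
      · rw [hpb] at hold ⊢
        calc K.getD x 0 < K.getD b 0 := hold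
          _ ≤ K'.getD b 0 := hK'b
      · rw [hK'a _ hpb]; exact hold

theorem ufUnion_cases (n : Nat) (st : List Nat × List Nat) (i j : Nat)
    (h : rankOK n st.1 st.2) (hi : i < n) (hj : j < n) :
    (ufFind st.1 n i = ufFind st.1 n j ∧ ufUnion n st i j = st) ∨
    (∃ a b,
      ((a = ufFind st.1 n i ∧ b = ufFind st.1 n j) ∨ (a = ufFind st.1 n j ∧ b = ufFind st.1 n i)) ∧
      a < n ∧ b < n ∧ st.1.getD a a = a ∧ st.1.getD b b = b ∧ a ≠ b ∧
      (ufUnion n st i j).1 = st.1.set a b ∧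
      rankOK n (ufUnion n st i j).1 (ufUnion n st i j).2) := by
  have hAi := ufFind_adequate n st.1 st.2 h n i hi (ufS_card_le n st.2 i)
  have hAj := ufFind_adequate n st.1 st.2 h n j hj (ufS_card_le n st.2 j)
  by_cases hrr : ufFind st.1 n i = ufFind st.1 n j
  · exact Or.inl ⟨hrr, ufUnion_same n st i j hrr⟩
  · right
    by_cases hlt : st.2.getD (ufFind st.1 n i) 0 < st.2.getD (ufFind st.1 n j) 0
    · refine ⟨ufFind st.1 n i, ufFind st.1 n j, Or.inl ⟨rfl, rfl⟩,
        hAi.2.1, hAj.2.1, hAi.2.2, hAj.2.2, hrr, ?_, ?_⟩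
      · rw [ufUnion_ltK n st i j hrr hlt]
      · rw [ufUnion_ltK n st i j hrr hlt]
        have := set_rankOK n st.1 st.2 h _ _ hAi.2.1 hAj.2.1 hAi.2.2 hAj.2.2 hrr (le_of_lt hlt)
        rw [if_neg (by omega)] at this
        exact this
    · by_cases hgt : st.2.getD (ufFind st.1 n j) 0 < st.2.getD (ufFind st.1 n i) 0
      · refine ⟨ufFind st.1 n j, ufFind st.1 n i, Or.inr ⟨rfl, rfl⟩,
          hAj.2.1, hAi.2.1, hAj.2.2, hAi.2.2, fun hh => hrr hh.symm, ?_, ?_⟩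
        · rw [ufUnion_gtK n st i j hrr hlt hgt]
        · rw [ufUnion_gtK n st i j hrr hlt hgt]
          have := set_rankOK n st.1 st.2 h _ _ hAj.2.1 hAi.2.1 hAj.2.2 hAi.2.2
            (fun hh => hrr hh.symm) (le_of_lt hgt)
          rw [if_neg (by omega)] at this
          exact this
      · have heqK : st.2.getD (ufFind st.1 n i) 0 = st.2.getD (ufFind st.1 n j) 0 := by omega
        refine ⟨ufFind st.1 n i, ufFind st.1 n j, Or.inl ⟨rfl, rfl⟩,
          hAi.2.1, hAj.2.1, hAi.2.2, hAj.2.2, hrr, ?_, ?_⟩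
        · rw [ufUnion_eqK n st i j hrr hlt hgt]
        · rw [ufUnion_eqK n st i j hrr hlt hgt]
          have := set_rankOK n st.1 st.2 h _ _ hAi.2.1 hAj.2.1 hAi.2.2 hAj.2.2 hrr (le_of_eq heqK)
          rw [if_pos heqK] at this
          exact this

theorem ufUnion_rankOK (n : Nat) (st : List Nat × List Nat) (i j : Nat)
    (h : rankOK n st.1 st.2) (hi : i < n) (hj : j < n) :
    rankOK n (ufUnion n st i j).1 (ufUnion n st i j).2 := by
  rcases ufUnion_cases n st i j h hi hj with ⟨_, heq⟩ | ⟨a, b, _, _, _, _, _, _, _, hrk⟩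
  · rw [heq]; exact h
  · exact hrk

theorem ufUnion_pres_eq (n : Nat) (st : List Nat × List Nat) (i j : Nat)
    (h : rankOK n st.1 st.2) (hi : i < n) (hj : j < n) :
    ∀ a b, a < n → b < n → ufFind st.1 n a = ufFind st.1 n b →
      ufFind (ufUnion n st i j).1 n a = ufFind (ufUnion n st i j).1 n b := by
  intro x y hx hy hxy
  rcases ufUnion_cases n st i j h hi hj with ⟨_, heq⟩ | ⟨a, b, _, ha, hb, hra, hrb, hab, hP, _⟩
  · rw [heq]; exact hxy
  · rw [hP, ufFind_set n st.1 st.2 h a b ha hb hra hrb hab n x hx (ufS_card_le n st.2 x),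
      ufFind_set n st.1 st.2 h a b ha hb hra hrb hab n y hy (ufS_card_le n st.2 y), hxy]

theorem ufUnion_new_eq (n : Nat) (st : List Nat × List Nat) (i j : Nat)
    (h : rankOK n st.1 st.2) (hi : i < n) (hj : j < n) :
    ufFind (ufUnion n st i j).1 n i = ufFind (ufUnion n st i j).1 n j := by
  rcases ufUnion_cases n st i j h hi hj with ⟨heqr, heq⟩ | ⟨a, b, hor, ha, hb, hra, hrb, hab, hP, _⟩
  · rw [heq]; exact heqr
  · rw [hP, ufFind_set n st.1 st.2 h a b ha hb hra hrb hab n i hi (ufS_card_le n st.2 i),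
      ufFind_set n st.1 st.2 h a b ha hb hra hrb hab n j hj (ufS_card_le n st.2 j)]
    rcases hor with ⟨rfl, rfl⟩ | ⟨rfl, rfl⟩
    · rw [if_pos rfl, if_neg (fun hh => hab hh.symm)]
    · rw [if_neg (fun hh => hab hh.symm), if_pos rfl]

theorem ufUnion_connOK (pts : List (Int × Int)) (st : List Nat × List Nat) (i j : Nat)
    (h : rankOK pts.length st.1 st.2) (hc : connOK pts st.1)
    (hi : i < pts.length) (hj : j < pts.length) (hconn : pvConn pts i j) :
    connOK pts (ufUnion pts.length st i j).1 := by
  rcases ufUnion_cases pts.length st i j h hi hj with ⟨_, heq⟩ |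
    ⟨a, b, hor, ha, hb, hra, hrb, hab, hP, _⟩
  · rw [heq]; exact hc
  · have hconnab : pvConn pts a b := by
      have hci : pvConn pts i (ufFind st.1 pts.length i) :=
        ufFind_conn pts st.1 st.2 h hc pts.length i hi (ufS_card_le pts.length st.2 i)
      have hcj : pvConn pts j (ufFind st.1 pts.length j) :=
        ufFind_conn pts st.1 st.2 h hc pts.length j hj (ufS_card_le pts.length st.2 j)
      rcases hor with ⟨rfl, rfl⟩ | ⟨rfl, rfl⟩
      · exact Relation.ReflTransGen.trans (pvConn_symm pts hci)
          (Relation.ReflTransGen.trans hconn hcj)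
      · exact Relation.ReflTransGen.trans (pvConn_symm pts hcj)
          (Relation.ReflTransGen.trans (pvConn_symm pts hconn) hci)
    intro x hx
    rw [hP]
    by_cases hxa : x = a
    · subst hxa
      rw [pvGetD_set_self st.1 x b x (h.1 ▸ ha)]
      exact hconnab
    · rw [pvGetD_set_ne st.1 a x b x hxa]
      exact hc x hx

/- the flattened pair list the nested loops of solution_alt traverse -/
def pvPairs (n : Nat) : List (Nat × Nat) :=
  (List.range n).flatMap (fun i => (List.range' (i + 1) (n - (i + 1))).map (fun j => (i, j)))

def pvStep2 (pts : List (Int × Int)) (st : List Nat × List Nat) (p : Nat × Nat) :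
    List Nat × List Nat :=
  if calculate_distance (pts.getD p.1 (0, 0)) (pts.getD p.2 (0, 0)) ≤ 1000 then
    ufUnion pts.length st p.1 p.2
  else st

theorem foldl_flatMap_pairs {α : Type} (g : Nat → List Nat)
    (h : α → Nat → Nat → α) :
    ∀ (l : List Nat) (init : α),
    l.foldl (fun st i => (g i).foldl (fun st j => h st i j) st) init =
      (l.flatMap (fun i => (g i).map (fun j => (i, j)))).foldl (fun st p => h st p.1 p.2) init := by
  intro l
  induction l with
  | nil => intro init; rfl
  | cons hd tl ih =>
    intro init
    simp only [List.foldl_cons, List.flatMap_cons, List.foldl_append, List.foldl_map]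
    exact ih _

theorem pvPairs_mem (n i j : Nat) (hij : i < j) (hj : j < n) : (i, j) ∈ pvPairs n := by
  unfold pvPairs
  rw [List.mem_flatMap]
  refine ⟨i, List.mem_range.mpr (lt_trans hij hj), ?_⟩
  rw [List.mem_map]
  exact ⟨j, List.mem_range'_1.mpr ⟨hij, by omega⟩, rfl⟩

theorem pvPairs_valid (n : Nat) : ∀ p ∈ pvPairs n, p.1 < n ∧ p.2 < n := by
  intro p hp
  unfold pvPairs at hp
  rw [List.mem_flatMap] at hp
  obtain ⟨i, hi, hmem⟩ := hp
  rw [List.mem_map] at hmem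
  obtain ⟨j, hj, rfl⟩ := hmem
  rw [List.mem_range'_1] at hj
  rw [List.mem_range] at hi
  exact ⟨hi, by omega⟩

theorem pvStep2_inv (pts : List (Int × Int)) (st : List Nat × List Nat) (p : Nat × Nat)
    (hv : p.1 < pts.length ∧ p.2 < pts.length) (h : ufInv pts st) :
    ufInv pts (pvStep2 pts st p) := by
  unfold pvStep2
  split
  · rename_i hdist
    have hconn : pvConn pts p.1 p.2 :=
      Relation.ReflTransGen.single ⟨hv.1, hv.2, hdist⟩
    exact ⟨ufUnion_rankOK pts.length st p.1 p.2 h.1 hv.1 hv.2,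
      ufUnion_connOK pts st p.1 p.2 h.1 h.2 hv.1 hv.2 hconn⟩
  · exact h

theorem pvFold_inv (pts : List (Int × Int)) :
    ∀ (L : List (Nat × Nat)) (st : List Nat × List Nat),
    (∀ p ∈ L, p.1 < pts.length ∧ p.2 < pts.length) → ufInv pts st →
    ufInv pts (L.foldl (pvStep2 pts) st) := by
  intro L
  induction L with
  | nil => intro st _ h; exact h
  | cons p tl ih =>
    intro st hval h
    exact ih (pvStep2 pts st p) (fun q hq => hval q (List.mem_cons_of_mem _ hq))
      (pvStep2_inv pts st p (hval p (List.mem_cons_self ..)) h)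

theorem pvFold_pres_eq (pts : List (Int × Int)) :
    ∀ (L : List (Nat × Nat)) (st : List Nat × List Nat),
    (∀ p ∈ L, p.1 < pts.length ∧ p.2 < pts.length) → ufInv pts st →
    ∀ a b, a < pts.length → b < pts.length →
    ufFind st.1 pts.length a = ufFind st.1 pts.length b →
    ufFind (L.foldl (pvStep2 pts) st).1 pts.length a =
      ufFind (L.foldl (pvStep2 pts) st).1 pts.length b := by
  intro L
  induction L with
  | nil => intro st _ _ a b _ _ heq; exact heq
  | cons p tl ih =>
    intro st hval h a b ha hb heq
    have hvp := hval p (List.mem_cons_self ..)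
    have h1 : ufFind (pvStep2 pts st p).1 pts.length a =
        ufFind (pvStep2 pts st p).1 pts.length b := by
      unfold pvStep2
      split
      · exact ufUnion_pres_eq pts.length st p.1 p.2 h.1 hvp.1 hvp.2 a b ha hb heq
      · exact heq
    exact ih (pvStep2 pts st p) (fun q hq => hval q (List.mem_cons_of_mem _ hq))
      (pvStep2_inv pts st p hvp h) a b ha hb h1

theorem pvFold_edge_eq (pts : List (Int × Int)) :
    ∀ (L : List (Nat × Nat)) (st : List Nat × List Nat),
    (∀ p ∈ L, p.1 < pts.length ∧ p.2 < pts.length) → ufInv pts st →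
    ∀ i j, (i, j) ∈ L →
    calculate_distance (pts.getD i (0, 0)) (pts.getD j (0, 0)) ≤ 1000 →
    ufFind (L.foldl (pvStep2 pts) st).1 pts.length i =
      ufFind (L.foldl (pvStep2 pts) st).1 pts.length j := by
  intro L
  induction L with
  | nil => intro st _ _ i j hmem _; simp at hmem
  | cons p tl ih =>
    intro st hval h i j hmem hdist
    have hvp := hval p (List.mem_cons_self ..)
    rcases List.mem_cons.mp hmem with heq | htl
    · subst heq
      have hstep : pvStep2 pts st (i, j) = ufUnion pts.length st i j := by
        unfold pvStep2
        split
        · rfl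
        · rename_i hneg; exact absurd hdist hneg
      have h1 : ufFind (pvStep2 pts st (i, j)).1 pts.length i =
          ufFind (pvStep2 pts st (i, j)).1 pts.length j := by
        rw [hstep]
        exact ufUnion_new_eq pts.length st i j h.1 hvp.1 hvp.2
      exact pvFold_pres_eq pts tl (pvStep2 pts st (i, j))
        (fun q hq => hval q (List.mem_cons_of_mem _ hq))
        (pvStep2_inv pts st (i, j) hvp h) i j hvp.1 hvp.2 h1
    · exact ih (pvStep2 pts st p) (fun q hq => hval q (List.mem_cons_of_mem _ hq))
        (pvStep2_inv pts st p hvp h) i j htl hdist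

theorem ufInit_inv (pts : List (Int × Int)) :
    ufInv pts (List.range pts.length, List.replicate pts.length 0) := by
  have hgetD : ∀ i, i < pts.length → (List.range pts.length).getD i i = i := by
    intro i hi
    rw [List.getD_eq_getElem _ _ (by simpa using hi), List.getElem_range]
  refine ⟨⟨by simp, by simp, ?_, ?_⟩, ?_⟩
  · intro i hi; rw [hgetD i hi]; exact hi
  · intro i hi hne; exact absurd (hgetD i hi) hne
  · intro i hi; rw [hgetD i hi]; exact Relation.ReflTransGen.refl

theorem pvConn_roots_eq (pts : List (Int × Int)) (x y : Nat) (h : pvConn pts x y) :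
    ufFind ((pvPairs pts.length).foldl (pvStep2 pts)
        (List.range pts.length, List.replicate pts.length 0)).1 pts.length x =
      ufFind ((pvPairs pts.length).foldl (pvStep2 pts)
        (List.range pts.length, List.replicate pts.length 0)).1 pts.length y := by
  induction h with
  | refl => rfl
  | @tail c d hcj hR ih =>
    obtain ⟨hc, hd, hdist⟩ := hR
    have hinv := ufInit_inv pts
    have hedge : ufFind ((pvPairs pts.length).foldl (pvStep2 pts)
          (List.range pts.length, List.replicate pts.length 0)).1 pts.length c =
        ufFind ((pvPairs pts.length).foldl (pvStep2 pts)
          (List.range pts.length, List.replicate pts.length 0)).1 pts.length d := by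
      rcases Nat.lt_trichotomy c d with hlt | heqcd | hgt
      · exact pvFold_edge_eq pts (pvPairs pts.length) _ (pvPairs_valid _) hinv c d
          (pvPairs_mem pts.length c d hlt hd) hdist
      · rw [heqcd]
      · refine (pvFold_edge_eq pts (pvPairs pts.length) _ (pvPairs_valid _) hinv d c
          (pvPairs_mem pts.length d c hgt hc) ?_).symm
        rw [calc_dist_symm]; exact hdist
    exact ih.trans hedge

theorem solution_alt_char (home : Int × Int) (drug_stores : List (Int × Int))
    (festival : Int × Int) :
    (solution_alt home drug_stores festival = "happy" ↔
      pvConn (pvPts home drug_stores festival) 0 (drug_stores.length + 1)) := by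
  have hflat := foldl_flatMap_pairs
    (g := fun i => List.range' (i + 1) ((pvPts home drug_stores festival).length - (i + 1)))
    (h := fun st i j =>
      if |((pvPts home drug_stores festival).getD i (0, 0)).1 -
            ((pvPts home drug_stores festival).getD j (0, 0)).1| +
          |((pvPts home drug_stores festival).getD i (0, 0)).2 -
            ((pvPts home drug_stores festival).getD j (0, 0)).2| ≤ 1000 then
        ufUnion (pvPts home drug_stores festival).length st i j
      else st)
    (List.range (pvPts home drug_stores festival).length)
    (List.range (pvPts home drug_stores festival).length,
      List.replicate (pvPts home drug_stores festival).length 0)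
  have hlen := pvPts_length home drug_stores festival
  have hsol : solution_alt home drug_stores festival =
      if ufFind ((pvPairs (pvPts home drug_stores festival).length).foldl
            (pvStep2 (pvPts home drug_stores festival))
            (List.range (pvPts home drug_stores festival).length,
              List.replicate (pvPts home drug_stores festival).length 0)).1
          (pvPts home drug_stores festival).length 0 =
        ufFind ((pvPairs (pvPts home drug_stores festival).length).foldl
            (pvStep2 (pvPts home drug_stores festival))
            (List.range (pvPts home drug_stores festival).length,
              List.replicate (pvPts home drug_stores festival).length 0)).1
          (pvPts home drug_stores festival).length
          ((pvPts home drug_stores festival).length - 1) then "happy" else "sad" := by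
    simp only [solution_alt]
    rw [← pvPts_def home drug_stores festival, hflat]
    rfl
  have hinv : ufInv (pvPts home drug_stores festival)
      ((pvPairs (pvPts home drug_stores festival).length).foldl
        (pvStep2 (pvPts home drug_stores festival))
        (List.range (pvPts home drug_stores festival).length,
          List.replicate (pvPts home drug_stores festival).length 0)) :=
    pvFold_inv _ _ _ (pvPairs_valid _) (ufInit_inv _)
  rw [hsol, show (pvPts home drug_stores festival).length - 1 = drug_stores.length + 1 by omega]
  by_cases heq : ufFind ((pvPairs (pvPts home drug_stores festival).length).foldl
        (pvStep2 (pvPts home drug_stores festival))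
        (List.range (pvPts home drug_stores festival).length,
          List.replicate (pvPts home drug_stores festival).length 0)).1
      (pvPts home drug_stores festival).length 0 =
      ufFind ((pvPairs (pvPts home drug_stores festival).length).foldl
        (pvStep2 (pvPts home drug_stores festival))
        (List.range (pvPts home drug_stores festival).length,
          List.replicate (pvPts home drug_stores festival).length 0)).1
      (pvPts home drug_stores festival).length (drug_stores.length + 1)
  · rw [if_pos heq]
    constructor
    · intro _
      have h0 := ufFind_conn _ _ _ hinv.1 hinv.2 (pvPts home drug_stores festival).length 0
        (by omega) (ufS_card_le _ _ _)
      have hL := ufFind_conn _ _ _ hinv.1 hinv.2 (pvPts home drug_stores festival).length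
        (drug_stores.length + 1) (by omega) (ufS_card_le _ _ _)
      exact Relation.ReflTransGen.trans (heq ▸ h0) (pvConn_symm _ hL)
    · intro _; rfl
  · rw [if_neg heq]
    constructor
    · intro habs; exact absurd habs (by decide)
    · intro hconn
      exact absurd (pvConn_roots_eq _ 0 (drug_stores.length + 1) hconn) heq

theorem solution_alt_sad (home : Int × Int) (drug_stores : List (Int × Int))
    (festival : Int × Int) :
    solution_alt home drug_stores festival = "happy" ∨
      solution_alt home drug_stores festival = "sad" := by
  unfold solution_alt
  simp only []
  split
  · left; rfl
  · right; rfl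

/- ---------- bridge ---------- -/

theorem pvPts_getD_last (home : Int × Int) (ss : List (Int × Int)) (f : Int × Int) :
    (pvPts home ss f).getD (ss.length + 1) (0, 0) = f := by
  unfold pvPts
  rw [List.getD_cons_succ, List.getD_eq_getElem _ _ (by simp),
    List.getElem_append_right (by omega)]
  simp

theorem pvPts_getD_store (home : Int × Int) (ss : List (Int × Int)) (f : Int × Int)
    (m : Nat) (hm : m < ss.length) :
    (pvPts home ss f).getD (m + 1) (0, 0) = ss.getD m (0, 0) := by
  unfold pvPts
  rw [List.getD_cons_succ, List.getD_eq_getElem _ _ (by simp; omega),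
    List.getElem_append_left (by omega), List.getD_eq_getElem _ _ hm]

theorem happy_to_conn (home : Int × Int) (ss : List (Int × Int)) (f : Int × Int)
    (h : pvHappy home ss f) : pvConn (pvPts home ss f) 0 (ss.length + 1) := by
  obtain ⟨p, hp, hd⟩ := h
  have hlen := pvPts_length home ss f
  have key : ∀ q, pvReach home ss q → ∃ k, k < ss.length + 1 ∧
      (pvPts home ss f).getD k (0, 0) = q ∧ pvConn (pvPts home ss f) 0 k := by
    intro q hq
    induction hq with
    | base => exact ⟨0, by omega, rfl, Relation.ReflTransGen.refl⟩
    | @step p' s hp' hs hds ih =>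
      obtain ⟨k, hk, hgk, hck⟩ := ih
      obtain ⟨m, hm, rfl⟩ := List.mem_iff_getElem.mp hs
      refine ⟨m + 1, by omega, ?_, ?_⟩
      · rw [pvPts_getD_store home ss f m hm, List.getD_eq_getElem _ _ hm]
      · refine hck.tail ⟨by omega, by omega, ?_⟩
        rw [hgk, pvPts_getD_store home ss f m hm, List.getD_eq_getElem _ _ hm]
        exact hds
  obtain ⟨k, hk, hgk, hck⟩ := key p hp
  refine hck.tail ⟨by omega, by omega, ?_⟩
  rw [hgk, pvPts_getD_last]
  exact hd

theorem conn_to_happy (home : Int × Int) (ss : List (Int × Int)) (f : Int × Int)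
    (h : pvConn (pvPts home ss f) 0 (ss.length + 1)) : pvHappy home ss f := by
  have hlen := pvPts_length home ss f
  suffices hP : ∀ k, pvConn (pvPts home ss f) 0 k →
      pvHappy home ss f ∨ (k ≠ ss.length + 1 ∧ pvReach home ss ((pvPts home ss f).getD k (0, 0))) by
    rcases hP _ h with h' | ⟨hne, _⟩
    · exact h'
    · exact absurd rfl hne
  intro k hconn
  induction hconn with
  | refl => exact Or.inr ⟨by omega, pvReach.base⟩
  | @tail j k hcj hR ih =>
    rcases ih with hH | ⟨hne, hreach⟩
    · exact Or.inl hH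
    · obtain ⟨hjn, hkn, hdist⟩ := hR
      by_cases hk : k = ss.length + 1
      · subst hk
        rw [pvPts_getD_last home ss f] at hdist
        exact Or.inl ⟨_, hreach, hdist⟩
      · refine Or.inr ⟨hk, ?_⟩
        cases k with
        | zero => exact pvReach.base
        | succ m =>
          have hm : m < ss.length := by omega
          rw [pvPts_getD_store home ss f m hm] at hdist ⊢
          refine pvReach.step hreach ?_ hdist
          rw [List.getD_eq_getElem _ _ hm]
          exact List.getElem_mem hm


-- ===== VERDICT (by name: the statement is the Claim_ definition above) =====
theorem solution_spec : Claim_equal_solution := by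
  intro home drug_stores festival _
  unfold Spec_solution
  by_cases hH : pvHappy home drug_stores festival
  · rw [(solution_char home drug_stores festival).mpr hH,
      (solution_alt_char home drug_stores festival).mpr (happy_to_conn _ _ _ hH)]
  · have hA : solution home drug_stores festival = "sad" := by
      rcases bfsLoop_sad festival drug_stores (drug_stores.length + 1) [home]
        (List.replicate drug_stores.length false) with h | h
      · exact absurd ((solution_char home drug_stores festival).mp h) hH
      · exact h
    have hB : solution_alt home drug_stores festival = "sad" := by
      rcases solution_alt_sad home drug_stores festival with h | h
      · exact absurd (conn_to_happy _ _ _ ((solution_alt_char home drug_stores festival).mp h)) hH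
      · exact h
    rw [hA, hB]
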